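-- pv_equiv track=rewrite | github.com/choibyeol/algorithm | 프로그래머스/Python3/kakao/2021.py | solution
-- ===== SOURCE A (Python) =====
-- def solution(new_id):
--     answer = ''
--     temp = ''
--     special_list = ['-', '_', '.']
--
--     # 1단계
--     new_id = new_id.lower()
--     # 2단계
--     for n in new_id:
--         if n in special_list or n.isdigit() or n.isalpha():
--             temp += n
--
--     answer = temp
--     temp = ''
--     # 3단계
--     check = 0
--     for n in answer:
--         if n == '.':
--             check = 1
--             continue
--         else:
--             if check == 1:
--                 temp += '.'
--                 temp += n
--                 check = 0
--             else:
--                 temp += n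
--     answer = temp
--     # 4단계
--     if answer[0:1] == '.':
--         answer = answer[1:]
--     if answer[-1:] == '.':
--         answer = answer[:-1]
--     # 5단계
--     if answer == '':
--         answer = 'a'
--     # 6단계
--     if len(answer) >= 16:
--         answer = answer[0:15]
--     while True:
--         if answer[-1:] == '.':
--             answer = answer[0:-1]
--         else:
--             break
--     # 7단계
--     if len(answer) <= 2:
--         while True:
--             if len(answer) >= 3:
--                 break
--             else:
--                 answer += answer[-1:]
--
--     return answer
-- ===== SOURCE B (Python) =====
-- def solution(new_id):
--     # single forward pass: lowercase, filter, collapse dot runs and skip leading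
--     # dots on the fly, stopping as soon as 15 output chars exist
--     res = []
--     for ch in new_id:
--         c = ch.lower()
--         if c == '.':
--             if res and res[-1] != '.':
--                 res.append('.')
--         elif c.isalpha() or c.isdigit() or c in '-_':
--             res.append(c)
--         if len(res) == 15:
--             break
--     if res and res[-1] == '.':
--         res.pop()
--     if not res:
--         res = ['a']
--     s = ''.join(res)
--     return s + s[-1] * (3 - len(s))
-- ===== Notes on version B (the rewrite author's own statement) =====
-- stated objective: faster
-- what changed: Replaces A's six staged passes (filter loop, check-flag dot-collapse loop, slice strips, empty default, truncate, two while loops) by a single forward scan that lowers, filters, collapses dot runs and skips leading dots on the fly and breaks out as soon as 15 output characters exist, followed by constant-time pop/default/pad fix-ups.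
import Mathlib
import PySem

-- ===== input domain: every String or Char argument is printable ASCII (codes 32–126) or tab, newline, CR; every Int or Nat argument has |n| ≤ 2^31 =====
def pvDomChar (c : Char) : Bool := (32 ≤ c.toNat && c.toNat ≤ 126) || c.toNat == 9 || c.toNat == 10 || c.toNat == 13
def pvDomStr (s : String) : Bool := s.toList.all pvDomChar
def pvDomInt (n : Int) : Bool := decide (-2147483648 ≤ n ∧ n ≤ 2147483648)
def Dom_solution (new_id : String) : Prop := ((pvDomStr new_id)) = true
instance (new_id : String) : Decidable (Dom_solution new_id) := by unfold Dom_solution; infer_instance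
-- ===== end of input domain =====

-- B replaces A's staged passes (filter loop, check-flag collapse loop, slice strips, two while loops)
-- by ONE forward scan that lowers, filters, collapses dot runs and skips leading dots on the fly and
-- stops as soon as 15 output characters exist, followed by three constant-time fix-ups.

-- ===== PORT A =====
-- step 2 loop: temp accumulates the kept characters
def pvA_step2 (temp : List Char) : List Char → List Char
  | [] => temp
  | n :: rest =>
    if n ∈ (['-', '_', '.'] : List Char) ∨ PySem.Chars.isdigit n = true ∨ PySem.Chars.isalpha n = true
    then pvA_step2 (temp ++ [n]) rest
    else pvA_step2 temp rest

-- step 3 loop: temp plus the integer flag `check`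
def pvA_step3 (temp : List Char) (check : Int) : List Char → List Char
  | [] => temp
  | n :: rest =>
    if n = '.' then pvA_step3 temp 1 rest
    else if check = 1 then pvA_step3 ((temp ++ ['.']) ++ [n]) 0 rest
    else pvA_step3 (temp ++ [n]) 0 rest

-- step 6 while loop: while answer[-1:] == '.': answer = answer[0:-1]
def pvA_step6 (answer : List Char) : List Char :=
  if PySem.List.slice answer (some (-1)) none = ['.'] then
    pvA_step6 (PySem.List.slice answer (some 0) (some (-1)))
  else answer
termination_by answer.length
decreasing_by
  rename_i h
  have hne : answer ≠ [] := by rintro rfl; simp [PySem.List.slice] at h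
  have hpos : 0 < answer.length := List.length_pos_of_ne_nil hne
  simp only [PySem.List.slice_zero_start, PySem.List.slice_to_neg_one, List.length_dropLast]
  omega

-- step 7 while loop: while len(answer) < 3: answer += answer[-1:]
-- (the `answer = []` branch is a totality guard only: Python loops forever there; it is unreachable from solution)
def pvA_step7 (answer : List Char) : List Char :=
  if answer.length ≥ 3 then answer
  else if h : answer = [] then answer
  else pvA_step7 (answer ++ PySem.List.slice answer (some (-1)) none)
termination_by 3 - answer.length
decreasing_by
  rename_i h3
  rw [PySem.List.slice_from_neg_one]
  have hpos : 0 < answer.length := List.length_pos_of_ne_nil h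
  simp only [List.length_append, List.length_drop]
  omega

def solution (new_id : String) : String :=
  let lowered := PySem.Chars.lower new_id.toList
  let temp := pvA_step2 [] lowered
  let answer := temp
  let answer := pvA_step3 [] 0 answer
  let answer := if PySem.List.slice answer (some 0) (some 1) = ['.']
                then PySem.List.slice answer (some 1) none else answer
  let answer := if PySem.List.slice answer (some (-1)) none = ['.']
                then PySem.List.slice answer none (some (-1)) else answer
  let answer := if answer = [] then ['a'] else answer
  let answer := if answer.length ≥ 16 then PySem.List.slice answer (some 0) (some 15) else answer
  let answer := pvA_step6 answer
  let answer := if answer.length ≤ 2 then pvA_step7 answer else answer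
  String.mk answer

-- ===== PORT B =====
def pvB_keepND (c : Char) : Bool :=
  PySem.Chars.isalpha c || PySem.Chars.isdigit c || c == '-' || c == '_'

-- the single scan loop of Source B: lower each char, append under the collapse/skip rules,
-- break out as soon as the accumulator holds 15 characters
def pvB_scan (res : List Char) : List Char → List Char
  | [] => res
  | ch :: rest =>
    let c := PySem.Chars.lowerChar ch
    let res' := if c = '.' then
        (if res ≠ [] ∧ PySem.List.pyGet? res (-1) ≠ some '.' then res ++ ['.'] else res)
      else if pvB_keepND c then res ++ [c] else res
    if res'.length = 15 then res' else pvB_scan res' rest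

def solution_alt (new_id : String) : String :=
  let res := pvB_scan [] new_id.toList
  let res := if res ≠ [] ∧ PySem.List.pyGet? res (-1) = some '.' then res.dropLast else res
  let res := if res = [] then ['a'] else res
  match PySem.List.pyGet? res (-1) with
  | some ch => String.mk (res ++ List.replicate (3 - res.length) ch)
  | none => String.mk res   -- unreachable: res is nonempty here; Python would raise

-- ===== PRECONDITION & SPEC =====
def Spec_solution (new_id : String) (out : String) : Prop := out = solution_alt new_id
instance (new_id : String) (out : String) : Decidable (Spec_solution new_id out) := by unfold Spec_solution; infer_instance

-- ===== CLAIM (what is proved, stated in full; the proofs are below) =====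
def Claim_equal_solution : Prop := ∀ (new_id : String), Dom_solution new_id → Spec_solution new_id (solution new_id)

-- ===== LEMMAS AND PROOFS =====

-- proof-internal staged pipeline (the intermediate normal form both programs are reduced to)
def pvB_keep (c : Char) : Bool :=
  PySem.Chars.isalpha c || PySem.Chars.isdigit c || c == '-' || c == '_' || c == '.'

def pvB_collapse (out : List Char) (c : Char) : List Char :=
  if c = '.' ∧ out ≠ [] ∧ PySem.List.pyGet? out (-1) = some '.' then out else out ++ [c]

def pvB_rstripDots (l : List Char) : List Char :=
  (l.reverse.dropWhile (fun c => c == '.')).reverse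

def pvPipe (new_id : String) : String :=
  let kept := (PySem.Chars.lower new_id.toList).filter pvB_keep
  let out := kept.foldl pvB_collapse []
  let answer := PySem.Chars.stripChars out ['.']
  let answer := if answer = [] then ['a'] else answer
  let answer := pvB_rstripDots (answer.take 15)
  match PySem.List.pyGet? answer (-1) with
  | some ch => String.mk (answer ++ List.replicate (3 - answer.length) ch)
  | none => String.mk answer

-- pure form of A's step-3 state machine
def pvG : List Char → Bool → List Char
  | [], _ => []
  | n :: r, k =>
    if n = '.' then pvG r true
    else if k then '.' :: n :: pvG r false
    else n :: pvG r false

-- pure form of the collapse fold (flag = output currently ends in a dot)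
def pvC : List Char → Bool → List Char
  | [], _ => []
  | c :: r, k =>
    if c = '.' then (if k then pvC r true else '.' :: pvC r true)
    else c :: pvC r false

-- pure form of B's scan (flag = a dot may be appended: output nonempty, not ending in a dot)
def pvD : List Char → Bool → List Char
  | [], _ => []
  | ch :: r, k =>
    let c := PySem.Chars.lowerChar ch
    if c = '.' then (if k then '.' :: pvD r false else pvD r false)
    else if pvB_keepND c then c :: pvD r true
    else pvD r k

def pvFlag (res : List Char) : Bool := decide (res ≠ [] ∧ res.getLast? ≠ some '.')

-- suffix correction terms relating pvC to pvG
def pvF (s : List Char) : List Char := if s.getLast? = some '.' then ['.'] else []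
def pvE (s : List Char) : List Char := if s = [] ∨ s.getLast? = some '.' then ['.'] else []

lemma pvPyGetNeg1 {α : Type} (l : List α) : PySem.List.pyGet? l (-1) = l.getLast? := by
  cases l with
  | nil => simp [PySem.List.pyGet?, PySem.List.pyIdx?]
  | cons a t =>
    simp [PySem.List.pyGet?, PySem.List.pyIdx?]
    rw [List.getLast?_eq_getElem?]
    simp

lemma pvA_step2_eq (s temp : List Char) : pvA_step2 temp s = temp ++ s.filter pvB_keep := by
  induction s generalizing temp with
  | nil => simp [pvA_step2]
  | cons n r ih =>
    have hcond : (n ∈ (['-', '_', '.'] : List Char) ∨ PySem.Chars.isdigit n = true ∨ PySem.Chars.isalpha n = true) ↔ pvB_keep n = true := by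
      simp [pvB_keep, List.mem_cons]
      tauto
    by_cases h : pvB_keep n = true
    · rw [pvA_step2, if_pos (hcond.mpr h), ih]
      simp [h]
    · rw [pvA_step2, if_neg (fun hh => h (hcond.mp hh)), ih]
      simp [h]

lemma pvA_step3_eq (s temp : List Char) (c : Int) :
    pvA_step3 temp c s = temp ++ pvG s (c == 1) := by
  induction s generalizing temp c with
  | nil => simp [pvA_step3, pvG]
  | cons n r ih =>
    by_cases hn : n = '.'
    · simp [pvA_step3, hn, pvG, ih]
    · by_cases hc : c = 1
      · simp [pvA_step3, hn, hc, pvG, ih]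
      · have : (c == 1) = false := by simpa using hc
        simp [pvA_step3, hn, hc, pvG, ih, this]

lemma pvB_fold_eq (s out : List Char) :
    s.foldl pvB_collapse out = out ++ pvC s (out.getLast? == some '.') := by
  induction s generalizing out with
  | nil => simp [pvC]
  | cons c r ih =>
    rw [List.foldl_cons]
    by_cases hc : c = '.'
    · subst hc
      by_cases hk : out.getLast? = some '.'
      · have hne : out ≠ [] := fun h => by simp [h] at hk
        have h1 : pvB_collapse out '.' = out := by simp [pvB_collapse, hne, hk, pvPyGetNeg1]
        rw [h1, ih]
        simp [pvC, hk]
      · have h1 : pvB_collapse out '.' = out ++ ['.'] := by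
          simp [pvB_collapse, pvPyGetNeg1, hk]
        have hkf : (out.getLast? == some '.') = false := by simpa using hk
        rw [h1, ih]
        simp [pvC, hkf]
    · have h1 : pvB_collapse out c = out ++ [c] := by simp [pvB_collapse, hc]
      have h2 : ((out ++ [c]).getLast? == some '.') = false := by
        simp [hc]
      rw [h1, ih, h2]
      simp [pvC, hc]

lemma pvE_dot (r : List Char) : pvE ('.' :: r) = pvE r := by
  cases r with
  | nil => simp [pvE]
  | cons b t => simp [pvE, List.getLast?_cons_cons]

lemma pvF_dot (r : List Char) : pvF ('.' :: r) = pvE r := by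
  cases r with
  | nil => simp [pvF, pvE]
  | cons b t => simp [pvF, pvE, List.getLast?_cons_cons]

lemma pvE_nodot (c : Char) (r : List Char) (hc : c ≠ '.') : pvE (c :: r) = pvF r := by
  cases r with
  | nil => simp [pvE, pvF, hc]
  | cons b t => simp [pvE, pvF, List.getLast?_cons_cons]

lemma pvF_nodot (c : Char) (r : List Char) (hc : c ≠ '.') : pvF (c :: r) = pvF r := by
  cases r with
  | nil => simp [pvF, hc]
  | cons b t => simp [pvF, List.getLast?_cons_cons]

lemma pvCG (s : List Char) :
    ('.' :: pvC s true = pvG s true ++ pvE s) ∧ (pvC s false = pvG s false ++ pvF s) := by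
  induction s with
  | nil => simp [pvC, pvG, pvE, pvF]
  | cons c r ih =>
    obtain ⟨ih1, ih2⟩ := ih
    by_cases hc : c = '.'
    · subst hc
      refine ⟨?_, ?_⟩
      · rw [show pvC ('.' :: r) true = pvC r true from by simp [pvC],
            show pvG ('.' :: r) true = pvG r true from by simp [pvG], pvE_dot]
        exact ih1
      · rw [show pvC ('.' :: r) false = '.' :: pvC r true from by simp [pvC],
            show pvG ('.' :: r) false = pvG r true from by simp [pvG], pvF_dot]
        exact ih1
    · refine ⟨?_, ?_⟩
      · rw [show pvC (c :: r) true = c :: pvC r false from by simp [pvC, hc],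
            show pvG (c :: r) true = '.' :: c :: pvG r false from by simp [pvG, hc],
            pvE_nodot c r hc]
        simp [ih2]
      · rw [show pvC (c :: r) false = c :: pvC r false from by simp [pvC, hc],
            show pvG (c :: r) false = c :: pvG r false from by simp [pvG, hc],
            pvF_nodot c r hc]
        simp [ih2]

lemma pvG_last (s : List Char) : ∀ k, (pvG s k).getLast? ≠ some '.' := by
  induction s with
  | nil => intro k; simp [pvG]
  | cons c r ih =>
    intro k
    by_cases hc : c = '.'
    · simpa [pvG, hc] using ih true
    · have h2 : (c :: pvG r false).getLast? ≠ some '.' := by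
        cases hpv : pvG r false with
        | nil => simp [hc]
        | cons b t => rw [List.getLast?_cons_cons, ← hpv]; exact ih false
      cases k with
      | true =>
        rw [show pvG (c :: r) true = '.' :: c :: pvG r false from by simp [pvG, hc],
            List.getLast?_cons_cons]
        exact h2
      | false =>
        rw [show pvG (c :: r) false = c :: pvG r false from by simp [pvG, hc]]
        exact h2

lemma pvG_head (s : List Char) (k : Bool) (t : List Char) (h : pvG s k = '.' :: t) :
    ∃ n r', n ≠ '.' ∧ t = n :: r' := by
  induction s generalizing k with
  | nil => simp [pvG] at h
  | cons c r ih =>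
    by_cases hc : c = '.'
    · rw [show pvG (c :: r) k = pvG r true from by simp [pvG, hc]] at h
      exact ih true h
    · cases k with
      | true =>
        rw [show pvG (c :: r) true = '.' :: c :: pvG r false from by simp [pvG, hc]] at h
        exact ⟨c, pvG r false, hc, by simpa using h.symm⟩
      | false =>
        rw [show pvG (c :: r) false = c :: pvG r false from by simp [pvG, hc]] at h
        exact absurd (List.cons_eq_cons.mp h).1 hc

-- strip('.') on m ++ F, when m ends with a non-dot and F is [] or ['.']
lemma pv_rstrip_part (m F : List Char) (hm : m.getLast? ≠ some '.') (hF : F = [] ∨ F = ['.']) :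
    (List.dropWhile (fun c => (['.'] : List Char).contains c) (m ++ F).reverse).reverse = m := by
  have hdw : List.dropWhile (fun c => (['.'] : List Char).contains c) m.reverse = m.reverse := by
    cases hmr : m.reverse with
    | nil => simp
    | cons b t =>
      have hb : m.getLast? = some b := by
        rw [← List.head?_reverse, hmr]; rfl
      have hbne : b ≠ '.' := fun h => hm (h ▸ hb)
      rw [List.dropWhile_cons_of_neg]
      simp [hbne]
  rcases hF with rfl | rfl
  · simp only [List.append_nil, hdw, List.reverse_reverse]
  · rw [List.reverse_append]
    simp only [List.reverse_cons, List.reverse_nil, List.nil_append, List.singleton_append]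
    rw [List.dropWhile_cons_of_pos (by simp), hdw, List.reverse_reverse]

lemma pvF_shape (s : List Char) : pvF s = [] ∨ pvF s = ['.'] := by
  unfold pvF; split_ifs <;> simp

lemma pv_stripChars_eq (l : List Char) :
    PySem.Chars.stripChars l ['.'] =
      (List.dropWhile (fun c => (['.'] : List Char).contains c)
        (List.dropWhile (fun c => (['.'] : List Char).contains c) l).reverse).reverse := rfl

lemma pv_lastslice_ne (l : List Char) (h : l.getLast? ≠ some '.') :
    PySem.List.slice l (some (-1)) none ≠ ['.'] := by
  cases l with
  | nil => rw [PySem.List.slice_from_neg_one]; simp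
  | cons a t =>
    rw [PySem.List.slice_from_neg_one, List.drop_length_sub_one (by simp)]
    intro hco
    apply h
    rw [List.getLast?_eq_some_getLast (by simp)]
    have hx : (a :: t).getLast (by simp) = '.' := by simpa using hco
    rw [hx]

-- A's step 4 equals strip('.') applied to the collapsed list
lemma pv_step4_eq (s : List Char) :
    (if PySem.List.slice
          (if PySem.List.slice (pvG s false) (some 0) (some 1) = ['.']
           then PySem.List.slice (pvG s false) (some 1) none else pvG s false)
          (some (-1)) none = ['.']
     then PySem.List.slice
          (if PySem.List.slice (pvG s false) (some 0) (some 1) = ['.']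
           then PySem.List.slice (pvG s false) (some 1) none else pvG s false)
          none (some (-1))
     else (if PySem.List.slice (pvG s false) (some 0) (some 1) = ['.']
           then PySem.List.slice (pvG s false) (some 1) none else pvG s false))
    = PySem.Chars.stripChars (pvC s false) ['.'] := by
  rw [(pvCG s).2]
  have hlast := pvG_last s false
  have hFs := pvF_shape s
  rw [pv_stripChars_eq]
  cases hg : pvG s false with
  | nil =>
    rcases hFs with hF | hF <;> rw [hF] <;> decide
  | cons c t =>
    have hlast' : (c :: t).getLast? ≠ some '.' := hg ▸ hlast
    by_cases hc : c = '.'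
    · subst hc
      obtain ⟨n, r', hn, rfl⟩ := pvG_head s false t hg
      have hlr : (n :: r').getLast? ≠ some '.' := by
        rwa [List.getLast?_cons_cons] at hlast'
      have e1 : PySem.List.slice ('.' :: n :: r') (some 0) (some 1) = ['.'] := by
        rw [PySem.List.slice_zero_start, PySem.List.slice_to _ (by norm_num : (0:Int) ≤ 1)]
        rfl
      have e2 : PySem.List.slice ('.' :: n :: r') (some 1) none = n :: r' := by
        rw [PySem.List.slice_from _ (by norm_num : (0:Int) ≤ 1)]
        rfl
      rw [if_pos e1, e2, if_neg (pv_lastslice_ne _ hlr)]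
      rw [List.cons_append, List.dropWhile_cons_of_pos (by simp),
          List.cons_append, List.dropWhile_cons_of_neg (by simp [hn]),
          ← List.cons_append]
      exact (pv_rstrip_part (n :: r') (pvF s) hlr hFs).symm
    · have e1 : PySem.List.slice (c :: t) (some 0) (some 1) ≠ ['.'] := by
        rw [PySem.List.slice_zero_start, PySem.List.slice_to _ (by norm_num : (0:Int) ≤ 1)]
        simpa using fun h => hc h
      rw [if_neg e1, if_neg (pv_lastslice_ne _ hlast')]
      rw [List.cons_append, List.dropWhile_cons_of_neg (by simp [hc]),
          ← List.cons_append]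
      exact (pv_rstrip_part (c :: t) (pvF s) hlast' hFs).symm

lemma pv_trunc_eq (x : List Char) :
    (if x.length ≥ 16 then PySem.List.slice x (some 0) (some 15) else x) = x.take 15 := by
  rw [PySem.List.slice_zero_start, PySem.List.slice_to _ (by norm_num : (0:Int) ≤ 15)]
  split_ifs with h
  · rfl
  · rw [List.take_of_length_le (by omega)]

lemma pv_step6_rev (r : List Char) :
    pvA_step6 r.reverse = (r.dropWhile (fun c => c == '.')).reverse := by
  induction r with
  | nil => rw [pvA_step6]; simp [PySem.List.slice]
  | cons a t ih =>
    rw [pvA_step6]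
    have hsl : PySem.List.slice (a :: t).reverse (some (-1)) none = [a] := by
      rw [PySem.List.slice_from_neg_one,
          show (a :: t).reverse = t.reverse ++ [a] from by simp,
          show (t.reverse ++ [a]).length - 1 = t.reverse.length from by simp]
      exact List.drop_left
    by_cases ha : a = '.'
    · subst ha
      rw [if_pos (by rw [hsl])]
      have harg : PySem.List.slice ('.' :: t).reverse (some 0) (some (-1)) = t.reverse := by
        rw [PySem.List.slice_zero_start, PySem.List.slice_to_neg_one,
            show ('.' :: t).reverse = t.reverse ++ ['.'] from by simp, List.dropLast_concat]
      rw [harg, ih, List.dropWhile_cons_of_pos (by simp)]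
    · rw [if_neg (by rw [hsl]; simpa using ha)]
      rw [List.dropWhile_cons_of_neg (by simpa using ha)]

lemma pv_step6_eq (x : List Char) : pvA_step6 x = pvB_rstripDots x := by
  have h := pv_step6_rev x.reverse
  rwa [List.reverse_reverse] at h

lemma pv_pad_eq (x : List Char) :
    (if x.length ≤ 2 then pvA_step7 x else x)
    = (match PySem.List.pyGet? x (-1) with
       | some ch => x ++ List.replicate (3 - x.length) ch
       | none => x) := by
  match x with
  | [] =>
    rw [if_pos (by simp), pvA_step7]
    rfl
  | [a] =>
    have g1 : [a] ++ PySem.List.slice [a] (some (-1)) none = [a, a] := by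
      rw [PySem.List.slice_from_neg_one]; simp
    have g2 : [a, a] ++ PySem.List.slice [a, a] (some (-1)) none = [a, a, a] := by
      rw [PySem.List.slice_from_neg_one]; simp
    have h1 : pvA_step7 [a] = pvA_step7 [a, a] := by
      rw [pvA_step7, if_neg (by simp), dif_neg (by simp), g1]
    have h2 : pvA_step7 [a, a] = pvA_step7 [a, a, a] := by
      rw [pvA_step7, if_neg (by simp), dif_neg (by simp), g2]
    have h3 : pvA_step7 [a, a, a] = [a, a, a] := by
      rw [pvA_step7, if_pos (by simp)]
    rw [if_pos (by simp), h1, h2, h3]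
    rfl
  | [a, b] =>
    have g1 : [a, b] ++ PySem.List.slice [a, b] (some (-1)) none = [a, b, b] := by
      rw [PySem.List.slice_from_neg_one]; simp
    have h1 : pvA_step7 [a, b] = pvA_step7 [a, b, b] := by
      rw [pvA_step7, if_neg (by simp), dif_neg (by simp), g1]
    have h2 : pvA_step7 [a, b, b] = [a, b, b] := by
      rw [pvA_step7, if_pos (by simp)]
    rw [if_pos (by simp), h1, h2]
    rfl
  | a :: b :: c :: t =>
    rw [if_neg (by simp)]
    rw [pvPyGetNeg1]
    cases h : (a :: b :: c :: t).getLast? with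
    | none => simp at h
    | some ch =>
      simp

set_option maxHeartbeats 1000000 in
lemma pv_sol_eq_pipe (new_id : String) : solution new_id = pvPipe new_id := by
  simp only [solution, pvPipe]
  rw [pvA_step2_eq, pvA_step3_eq, pvB_fold_eq, List.nil_append,
      show ((0:Int) == 1) = false from by decide,
      show (List.getLast? ([] : List Char) == some '.') = false from by decide]
  rw [pv_step4_eq, pv_trunc_eq, pv_step6_eq, pv_pad_eq]
  have hsplit : ∀ (L : List Char),
      String.mk (match PySem.List.pyGet? L (-1) with
                 | some ch => L ++ List.replicate (3 - L.length) ch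
                 | none => L)
      = (match PySem.List.pyGet? L (-1) with
         | some ch => String.mk (L ++ List.replicate (3 - L.length) ch)
         | none => String.mk L) := by
    intro L
    cases PySem.List.pyGet? L (-1) <;> rfl
  exact hsplit _

-- ===== the B side: scan = take 15 of the pure generator, generator = pvC of the filtered input =====

lemma pv_keep_split (c : Char) : pvB_keep c = (pvB_keepND c || (c == '.')) := by
  simp [pvB_keep, pvB_keepND]

lemma pvD_eq_pvC (s : List Char) : ∀ k,
    pvD s k = pvC ((PySem.Chars.lower s).filter pvB_keep) (!k) := by
  induction s with
  | nil => intro k; rfl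
  | cons ch r ih =>
    intro k
    have hl : PySem.Chars.lower (ch :: r) = PySem.Chars.lowerChar ch :: PySem.Chars.lower r := rfl
    rw [hl, List.filter_cons]
    by_cases hdot : PySem.Chars.lowerChar ch = '.'
    · rw [if_pos (by simp [pv_keep_split, hdot])]
      cases k with
      | true => simp [pvD, pvC, hdot, ih]
      | false => simp [pvD, pvC, hdot, ih]
    · by_cases hnd : pvB_keepND (PySem.Chars.lowerChar ch) = true
      · rw [if_pos (by simp [pv_keep_split, hnd])]
        simp [pvD, pvC, hdot, hnd, ih]
      · rw [if_neg (by simp [pv_keep_split, hnd, hdot])]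
        simp [pvD, hdot, hnd, ih]

lemma pv_scan_eq (l : List Char) : ∀ (res : List Char), res.length < 15 →
    pvB_scan res l = (res ++ pvD l (pvFlag res)).take 15 := by
  induction l with
  | nil =>
    intro res h
    simp [pvB_scan, pvD, List.take_of_length_le (Nat.le_of_lt h)]
  | cons ch r ih =>
    intro res h
    rw [pvB_scan]
    set c := PySem.Chars.lowerChar ch with hc
    by_cases hdot : c = '.'
    · by_cases hfl : res ≠ [] ∧ res.getLast? ≠ some '.'
      · have hcond : res ≠ [] ∧ PySem.List.pyGet? res (-1) ≠ some '.' := by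
          rwa [pvPyGetNeg1]
        have hflag : pvFlag res = true := by simp [pvFlag, hfl.1, hfl.2]
        rw [show pvD (ch :: r) (pvFlag res) = '.' :: pvD r false from by
              simp [pvD, ← hc, hdot, hflag]]
        simp only [if_pos hdot, if_pos hcond]
        by_cases h15 : (res ++ ['.']).length = 15
        · rw [if_pos h15]
          rw [show res ++ '.' :: pvD r false = (res ++ ['.']) ++ pvD r false from by simp]
          rw [List.take_append, h15, List.take_of_length_le (by omega), Nat.sub_self]
          simp
        · rw [if_neg h15]
          have hlt : (res ++ ['.']).length < 15 := by
            simp only [List.length_append, List.length_cons, List.length_nil] at *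
            omega
          rw [ih _ hlt]
          have : pvFlag (res ++ ['.']) = false := by simp [pvFlag]
          rw [this]
          simp
      · have hcond : ¬ (res ≠ [] ∧ PySem.List.pyGet? res (-1) ≠ some '.') := by
          rwa [pvPyGetNeg1]
        have hflag : pvFlag res = false := by
          simp only [pvFlag, decide_eq_false_iff_not]
          exact hfl
        rw [show pvD (ch :: r) (pvFlag res) = pvD r false from by
              simp [pvD, ← hc, hdot, hflag]]
        simp only [if_pos hdot, if_neg hcond]
        rw [if_neg (by omega)]
        rw [ih _ h, hflag]
    · by_cases hnd : pvB_keepND c = true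
      · rw [show pvD (ch :: r) (pvFlag res) = c :: pvD r true from by
              simp [pvD, ← hc, hdot, hnd]]
        simp only [if_neg hdot, if_pos hnd]
        by_cases h15 : (res ++ [c]).length = 15
        · rw [if_pos h15]
          rw [show res ++ c :: pvD r true = (res ++ [c]) ++ pvD r true from by simp]
          rw [List.take_append, h15, List.take_of_length_le (by omega), Nat.sub_self]
          simp
        · rw [if_neg h15]
          have hlt : (res ++ [c]).length < 15 := by
            simp only [List.length_append, List.length_cons, List.length_nil] at *
            omega
          rw [ih _ hlt]
          have : pvFlag (res ++ [c]) = true := by simp [pvFlag, hdot]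
          rw [this]
          simp
      · rw [show pvD (ch :: r) (pvFlag res) = pvD r (pvFlag res) from by
              simp [pvD, ← hc, hdot, hnd]]
        simp only [if_neg hdot, if_neg hnd]
        rw [if_neg (by omega)]
        exact ih _ h

-- ===== structure of the collapsed list =====

lemma pvC_false_split (l : List Char) :
    pvC l false = (if l.head? = some '.' then ['.'] else []) ++ pvC l true := by
  cases l with
  | nil => simp [pvC]
  | cons c r =>
    by_cases hc : c = '.'
    · simp [pvC, hc]
    · simp [pvC, hc]

lemma pvC_true_head (l : List Char) : (pvC l true).head? ≠ some '.' := by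
  induction l with
  | nil => simp [pvC]
  | cons c r ih =>
    by_cases hc : c = '.'
    · simpa [pvC, hc] using ih
    · simp [pvC, hc]

lemma pvC_chain (l : List Char) : ∀ k, (pvC l k).IsChain (fun a b => a = '.' → b ≠ '.') := by
  induction l with
  | nil => intro k; simp [pvC]
  | cons c r ih =>
    intro k
    by_cases hc : c = '.'
    · cases k with
      | true => simpa [pvC, hc] using ih true
      | false =>
        rw [show pvC (c :: r) false = '.' :: pvC r true from by simp [pvC, hc]]
        cases hT : pvC r true with
        | nil => simp
        | cons b t =>
          refine List.isChain_cons_cons.mpr ⟨?_, hT ▸ ih true⟩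
          intro _ hb
          exact pvC_true_head r (by rw [hT, hb]; rfl)
    · rw [show pvC (c :: r) k = c :: pvC r false from by simp [pvC, hc]]
      cases hT : pvC r false with
      | nil => simp
      | cons b t =>
        exact List.isChain_cons_cons.mpr ⟨fun h => absurd h hc, hT ▸ ih false⟩

-- ===== pvB_rstripDots toolbox =====

lemma pv_rstrip_of_no_trailing (l : List Char) (h : l.getLast? ≠ some '.') :
    pvB_rstripDots l = l := by
  rw [pvB_rstripDots]
  cases hr : l.reverse with
  | nil =>
    have : l = [] := by simpa using congrArg List.reverse hr
    simp [this]
  | cons b t =>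
    have hb : l.getLast? = some b := by rw [← List.head?_reverse, hr]; rfl
    have hbne : (b == '.') = false := by
      simp only [beq_eq_false_iff_ne, ne_eq]
      intro hbd; exact h (hbd ▸ hb)
    rw [List.dropWhile_cons_of_neg (by simp [hbne]), ← hr, List.reverse_reverse]

lemma pv_dropWhile_replicate_dot (k : Nat) (x : List Char) :
    List.dropWhile (fun c => c == '.') (List.replicate k '.' ++ x)
      = List.dropWhile (fun c => c == '.') x := by
  induction k with
  | zero => simp
  | succ n ih =>
    rw [List.replicate_succ, List.cons_append, List.dropWhile_cons_of_pos (by simp)]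
    exact ih

lemma pv_rstrip_append_replicate (m : List Char) (k : Nat) :
    pvB_rstripDots (m ++ List.replicate k '.') = pvB_rstripDots m := by
  rw [pvB_rstripDots, pvB_rstripDots, List.reverse_append, List.reverse_replicate,
      pv_dropWhile_replicate_dot]

lemma pv_rstrip_decomp (l : List Char) :
    ∃ k, l = pvB_rstripDots l ++ List.replicate k '.' := by
  refine ⟨(l.reverse.takeWhile (fun c => c == '.')).length, ?_⟩
  have hsplit := List.takeWhile_append_dropWhile (p := fun c => c == '.') (l := l.reverse)
  have htw : l.reverse.takeWhile (fun c => c == '.')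
      = List.replicate (l.reverse.takeWhile (fun c => c == '.')).length '.' := by
    apply List.eq_replicate_of_mem
    intro b hb
    have := List.mem_takeWhile_imp hb
    simpa using this
  calc l = l.reverse.reverse := by rw [List.reverse_reverse]
    _ = (l.reverse.takeWhile (fun c => c == '.') ++ l.reverse.dropWhile (fun c => c == '.')).reverse := by rw [hsplit]
    _ = pvB_rstripDots l ++ (l.reverse.takeWhile (fun c => c == '.')).reverse := by
          rw [List.reverse_append]; rfl
    _ = _ := by rw [htw]; simp [List.reverse_replicate]

lemma pv_rstrip_take (l : List Char) (n : Nat) :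
    pvB_rstripDots ((pvB_rstripDots l).take n) = pvB_rstripDots (l.take n) := by
  obtain ⟨k, hk⟩ := pv_rstrip_decomp l
  conv_rhs => rw [hk]
  rw [List.take_append, List.take_replicate, pv_rstrip_append_replicate]

lemma pv_rstrip_ne_nil (l : List Char) (hne : l ≠ []) (hh : l.head? ≠ some '.') :
    pvB_rstripDots l ≠ [] := by
  intro hcontra
  obtain ⟨k, hk⟩ := pv_rstrip_decomp l
  rw [hcontra, List.nil_append] at hk
  cases k with
  | zero => simp [hk] at hne
  | succ n =>
    apply hh
    rw [hk, List.replicate_succ]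
    rfl

-- the pop-if-trailing-dot step equals rstrip('.') on a list without adjacent dots not starting with '.'
lemma pv_pop_eq_rstrip (l : List Char)
    (hch : l.IsChain (fun a b => a = '.' → b ≠ '.')) (hh : l.head? ≠ some '.') :
    (if l ≠ [] ∧ PySem.List.pyGet? l (-1) = some '.' then l.dropLast else l) = pvB_rstripDots l := by
  rw [pvPyGetNeg1]
  cases hlast : l.getLast? with
  | none =>
    have : l = [] := by simpa using hlast
    simp [this, pvB_rstripDots]
  | some c =>
    have hne : l ≠ [] := by intro h; rw [h] at hlast; simp at hlast
    by_cases hcd : c = '.'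
    · subst hcd
      rw [if_pos ⟨hne, rfl⟩]
      have hdecomp : l.dropLast ++ ['.'] = l := List.dropLast_append_getLast? '.' hlast
      have hmne : l.dropLast ≠ [] := by
        intro h0
        rw [h0, List.nil_append] at hdecomp
        apply hh; rw [← hdecomp]; rfl
      have hmlast : l.dropLast.getLast? ≠ some '.' := by
        intro hml
        have hdecomp2 : l.dropLast.dropLast ++ ['.'] = l.dropLast :=
          List.dropLast_append_getLast? '.' hml
        have hsuf : ['.', '.'] <:+ l := by
          refine ⟨l.dropLast.dropLast, ?_⟩
          rw [show l.dropLast.dropLast ++ ['.', '.'] = (l.dropLast.dropLast ++ ['.']) ++ ['.'] from by simp,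
              hdecomp2, hdecomp]
        have := (List.IsChain.suffix hch hsuf)
        have hRR : ('.' : Char) = '.' → ('.' : Char) ≠ '.' := by
          exact (List.isChain_cons_cons.mp this).1
        exact hRR rfl rfl
      calc l.dropLast = pvB_rstripDots l.dropLast := (pv_rstrip_of_no_trailing _ hmlast).symm
        _ = pvB_rstripDots (l.dropLast ++ List.replicate 1 '.') := (pv_rstrip_append_replicate _ 1).symm
        _ = pvB_rstripDots l := by rw [show List.replicate 1 '.' = ['.'] from rfl, hdecomp]
    · rw [if_neg (by rintro ⟨-, h⟩; exact hcd (Option.some_inj.mp h))]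
      rw [pv_rstrip_of_no_trailing l (by rw [hlast]; simp [hcd])]

lemma pv_head_take (l : List Char) (n : Nat) (hn : 0 < n) : (l.take n).head? = l.head? := by
  cases l with
  | nil => simp
  | cons a t =>
    cases n with
    | zero => omega
    | succ m => simp

lemma pv_contains_eq_beq :
    (fun c => (['.'] : List Char).contains c) = (fun c : Char => c == '.') := by
  funext c
  by_cases h : c = '.' <;> simp [h]

-- stripChars out ['.'] = rstrip('.') of pvC l true
lemma pv_strip_eq_rstrip_true (l : List Char) :
    PySem.Chars.stripChars (pvC l false) ['.'] = pvB_rstripDots (pvC l true) := by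
  rw [pv_stripChars_eq, pv_contains_eq_beq, pvC_false_split l]
  have hdropT : List.dropWhile (fun c : Char => c == '.') (pvC l true) = pvC l true := by
    cases hT : pvC l true with
    | nil => simp
    | cons b t =>
      have hb : b ≠ '.' := by
        intro h; exact pvC_true_head l (by rw [hT, h]; rfl)
      rw [List.dropWhile_cons_of_neg (by simp [hb])]
  by_cases hh : l.head? = some '.'
  · rw [if_pos hh, List.singleton_append, List.dropWhile_cons_of_pos (by simp), hdropT]
    rfl
  · rw [if_neg hh, List.nil_append, hdropT]
    rfl

set_option maxHeartbeats 1000000 in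
lemma pv_pipe_eq_alt (new_id : String) : pvPipe new_id = solution_alt new_id := by
  simp only [pvPipe, solution_alt]
  rw [pvB_fold_eq, List.nil_append,
      show (List.getLast? ([] : List Char) == some '.') = false from by decide]
  rw [pv_strip_eq_rstrip_true]
  rw [pv_scan_eq _ [] (by norm_num), List.nil_append,
      show pvFlag [] = false from by simp [pvFlag]]
  rw [pvD_eq_pvC, Bool.not_false]
  set L := (PySem.Chars.lower new_id.toList).filter pvB_keep with hL
  set T := pvC L true with hT
  have hhead : T.head? ≠ some '.' := pvC_true_head L
  have hchain : T.IsChain (fun a b => a = '.' → b ≠ '.') := pvC_chain L true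
  rw [pv_pop_eq_rstrip (T.take 15)
        (List.IsChain.prefix hchain (List.take_prefix 15 T))
        (by rw [pv_head_take _ _ (by norm_num)]; exact hhead)]
  by_cases hTnil : T = []
  · rw [hTnil]
    decide
  · have hu : pvB_rstripDots T ≠ [] := pv_rstrip_ne_nil T hTnil hhead
    rw [if_neg hu, pv_rstrip_take]
    have hTake : T.take 15 ≠ [] := by
      intro h
      rcases List.take_eq_nil_iff.mp h with h15 | hnil
      · simp at h15
      · exact hTnil hnil
    have hres : pvB_rstripDots (T.take 15) ≠ [] :=
      pv_rstrip_ne_nil _ hTake (by rw [pv_head_take _ _ (by norm_num)]; exact hhead)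
    rw [if_neg hres]

-- ===== VERDICT (by name: the statement is the Claim_ definition above) =====
theorem solution_spec : Claim_equal_solution := by
  intro new_id _
  show solution new_id = solution_alt new_id
  rw [pv_sol_eq_pipe, pv_pipe_eq_alt]
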